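-- pv_equiv track=rewrite | github.com/azdon/2024_advent_of_code | day_2/day_2_part_2.py | identify_safe_with_1_level_tolerance
-- ===== SOURCE A (Python) =====
-- safe_limits = [1, 2, 3]
--
-- def identify_safe_with_1_level_tolerance(values):
--
--     safe_count = 0
--
--     safe = True
--     increasing = False
--     decreasing = False
--
--     for i in range(0, len(values) - 1):
--         first_val = int(values[i])
--         second_val = int(values[i + 1])
--
--         if i == 0:
--             # Checking if inc or dec
--             if first_val > second_val:
--                 decreasing = True
--
--             elif first_val < second_val:
--                 increasing = True
--
--             else:
--                 safe = False
--
--             if abs(first_val - second_val) not in safe_limits: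
--                 safe = False
--
--         elif i > 0:
--             if first_val == second_val:
--                 safe = False
--
--             # Checking if next breaks pattern
--             if increasing and first_val > second_val:
--                 safe = False
--
--             if decreasing and first_val < second_val:
--                 safe = False
--
--             if abs(first_val - second_val) not in safe_limits:
--                 safe = False
--
--     return safe
-- ===== SOURCE B (Python) =====
-- def identify_safe_with_1_level_tolerance(values):
--     diffs = []
--     for i in range(len(values) - 1):
--         a = int(values[i])
--         b = int(values[i + 1])
--         diffs.append(b - a)
--     return all(d in (1, 2, 3) for d in diffs) or all(d in (-1, -2, -3) for d in diffs)
-- ===== Notes on version B (the rewrite author's own statement) =====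
-- stated objective: simpler
-- what changed: Replaces A's stateful safe/increasing/decreasing flag machine with a differences list and two direction checks: all diffs in (1,2,3) or all in (-1,-2,-3).
import Mathlib
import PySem

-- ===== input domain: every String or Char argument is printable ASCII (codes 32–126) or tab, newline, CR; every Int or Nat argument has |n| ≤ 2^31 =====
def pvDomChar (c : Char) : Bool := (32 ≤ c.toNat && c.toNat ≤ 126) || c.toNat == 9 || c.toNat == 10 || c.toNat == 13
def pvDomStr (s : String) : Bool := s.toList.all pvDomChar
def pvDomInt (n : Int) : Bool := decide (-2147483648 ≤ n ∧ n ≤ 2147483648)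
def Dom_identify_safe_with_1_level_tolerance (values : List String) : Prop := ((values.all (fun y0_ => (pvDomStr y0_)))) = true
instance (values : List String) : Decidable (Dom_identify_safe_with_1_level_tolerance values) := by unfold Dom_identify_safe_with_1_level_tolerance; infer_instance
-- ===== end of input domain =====

-- B replaces A's stateful safe/increasing/decreasing flag machine with a differences
-- list plus two monotone-direction checks (objective: simpler).


-- ===== PORT A =====
def safe_limits : List Int := [1, 2, 3]

-- int(values[i]); total form: Pre_ guarantees the parse succeeds wherever the loops convert
def pvToInt (s : String) : Int := (PySem.Int.ofStr? s).getD 0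

-- loop body of A, factored out so the proofs below can name it
def pvStepA (values : List String) (st : Bool × Bool × Bool) (i : Int) : Bool × Bool × Bool :=
  let safe := st.1
  let increasing := st.2.1
  let decreasing := st.2.2
  let first_val := pvToInt (PySem.List.pyGetD values i "")
  let second_val := pvToInt (PySem.List.pyGetD values (i + 1) "")
  if i = 0 then
    let (safe, increasing, decreasing) :=
      if first_val > second_val then (safe, increasing, true)
      else if first_val < second_val then (safe, true, decreasing)
      else (false, increasing, decreasing)
    let safe := if safe_limits.contains |first_val - second_val| then safe else false
    (safe, increasing, decreasing)
  else
    let safe := if first_val = second_val then false else safe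
    let safe := if increasing && decide (first_val > second_val) then false else safe
    let safe := if decreasing && decide (first_val < second_val) then false else safe
    let safe := if safe_limits.contains |first_val - second_val| then safe else false
    (safe, increasing, decreasing)

def identify_safe_with_1_level_tolerance (values : List String) : Bool :=
  ((PySem.List.pyRange 0 ((values.length : Int) - 1) 1).foldl (pvStepA values)
    (true, false, false)).1

-- ===== PORT B =====
-- loop body of B: append the next difference b - a
def pvDiffB (values : List String) (i : Int) : Int :=
  let a := pvToInt (PySem.List.pyGetD values i "")
  let b := pvToInt (PySem.List.pyGetD values (i + 1) "")
  b - a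

def identify_safe_with_1_level_tolerance_alt (values : List String) : Bool :=
  let diffs := (PySem.List.pyRange 0 ((values.length : Int) - 1) 1).foldl
    (fun acc i => acc ++ [pvDiffB values i]) []
  (diffs.all fun d => d = 1 || d = 2 || d = 3) ||
    (diffs.all fun d => d = -1 || d = -2 || d = -3)

-- ===== PRECONDITION & SPEC =====
-- Pre_ excludes exactly the inputs where Python's int() raises ValueError: lists of
-- length ≥ 2 containing a string that does not parse as an integer (length ≤ 1 converts nothing).
def Pre_identify_safe_with_1_level_tolerance (values : List String) : Prop :=
  2 ≤ values.length → ∀ s ∈ values, (PySem.Int.ofStr? s).isSome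

instance (values : List String) : Decidable (Pre_identify_safe_with_1_level_tolerance values) := by
  unfold Pre_identify_safe_with_1_level_tolerance; infer_instance

def pvWitness_identify_safe_with_1_level_tolerance : List String := ["1", "2", "4"]

def Spec_identify_safe_with_1_level_tolerance (values : List String) (out : Bool) : Prop := out = identify_safe_with_1_level_tolerance_alt values
instance (values : List String) (out : Bool) : Decidable (Spec_identify_safe_with_1_level_tolerance values out) := by unfold Spec_identify_safe_with_1_level_tolerance; infer_instance

-- ===== CLAIM (what is proved, stated in full; the proofs are below) =====
def Claim_equal_identify_safe_with_1_level_tolerance : Prop := ∀ (values : List String), Dom_identify_safe_with_1_level_tolerance values → Pre_identify_safe_with_1_level_tolerance values → Spec_identify_safe_with_1_level_tolerance values (identify_safe_with_1_level_tolerance values)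

-- ===== LEMMAS AND PROOFS =====

-- the cumulative per-step condition A applies at indices i ≥ 1
def pvCondA (inc dec : Bool) (x y : Int) : Bool :=
  !(decide (x = y)) && !(inc && decide (x > y)) && !(dec && decide (x < y)) &&
    safe_limits.contains |x - y|

theorem pvStepA_ne_zero (values : List String) (s inc dec : Bool) (i : Int) (h : ¬ i = 0) :
    pvStepA values (s, inc, dec) i =
      (s && pvCondA inc dec (pvToInt (PySem.List.pyGetD values i ""))
        (pvToInt (PySem.List.pyGetD values (i + 1) "")), inc, dec) := by
  simp only [pvStepA, pvCondA, if_neg h]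
  cases s <;> cases inc <;> cases dec <;>
    simp [Bool.and_comm, Bool.and_left_comm, Bool.and_assoc]

theorem pvFoldA_tail (values : List String) (inc dec : Bool) :
    ∀ (l : List Int), (∀ i ∈ l, ¬ i = 0) → ∀ (s : Bool),
      l.foldl (pvStepA values) (s, inc, dec) =
        (s && l.all (fun i => pvCondA inc dec (pvToInt (PySem.List.pyGetD values i ""))
          (pvToInt (PySem.List.pyGetD values (i + 1) ""))), inc, dec) := by
  intro l
  induction l with
  | nil => intro _ s; simp
  | cons a l ih =>
    intro h s
    simp only [List.foldl_cons, pvStepA_ne_zero values s inc dec a (h a (by simp))]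
    rw [ih (fun i hi => h i (by simp [hi]))]
    simp [Bool.and_assoc]

theorem pvCondA_inc (x y : Int) :
    pvCondA true false x y =
      (decide (y - x = 1) || decide (y - x = 2) || decide (y - x = 3)) := by
  rw [Bool.eq_iff_iff]
  simp only [pvCondA, safe_limits]
  by_cases hxy : x ≤ y
  · rw [abs_of_nonpos (by omega)]
    simp; constructor <;> intro h <;> omega
  · rw [abs_of_pos (by omega)]
    simp; omega

theorem pvCondA_dec (x y : Int) :
    pvCondA false true x y =
      (decide (y - x = -1) || decide (y - x = -2) || decide (y - x = -3)) := by
  rw [Bool.eq_iff_iff]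
  simp only [pvCondA, safe_limits]
  by_cases hxy : x ≤ y
  · rw [abs_of_nonpos (by omega)]
    simp; omega
  · rw [abs_of_pos (by omega)]
    simp; constructor <;> intro h <;> omega

-- ===== VERDICT (by name: the statement is the Claim_ definition above) =====
theorem identify_safe_with_1_level_tolerance_spec : Claim_equal_identify_safe_with_1_level_tolerance := by
  intro values _ _
  unfold Spec_identify_safe_with_1_level_tolerance
  unfold identify_safe_with_1_level_tolerance identify_safe_with_1_level_tolerance_alt
  rw [PySem.List.foldl_append_singleton_eq_map (pvDiffB values) _ []]
  by_cases hlen : (values.length : Int) - 1 ≤ 0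
  · rw [PySem.List.pyRange_one_eq_nil hlen]; simp
  · rw [PySem.List.pyRange_one_cons (by omega)]
    have htail : ∀ i ∈ PySem.List.pyRange (0 + 1) ((values.length : Int) - 1) 1, ¬ i = 0 := by
      intro i hi
      have := (PySem.List.mem_pyRange_one.mp hi).1
      omega
    set a := pvToInt (PySem.List.pyGetD values 0 "") with ha
    set b := pvToInt (PySem.List.pyGetD values 1 "") with hb
    have hd0 : pvDiffB values 0 = b - a := by simp [pvDiffB, ← ha, ← hb]
    simp only [List.foldl_cons, List.map_cons, List.nil_append, List.all_cons, hd0]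
    rcases lt_trichotomy a b with hab | hab | hab
    · have hstep : pvStepA values (true, false, false) 0 =
          (safe_limits.contains |a - b|, true, false) := by
        simp [pvStepA, ← ha, ← hb, hab, show ¬ b < a by omega]
      rw [hstep, pvFoldA_tail values true false _ htail]
      have hc : safe_limits.contains |a - b| =
          (decide (b - a = 1) || decide (b - a = 2) || decide (b - a = 3)) := by
        rw [Bool.eq_iff_iff]
        simp [safe_limits, abs_of_nonpos (by omega : a - b ≤ 0)]
        omega
      have hneg : (decide (b - a = -1) || decide (b - a = -2) || decide (b - a = -3)) = false := by
        simp; omega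
      simp only [List.all_map, hc, hneg, Bool.false_and, Bool.or_false]
      congr 1
      refine List.all_congr rfl (fun i => ?_)
      simp only [Function.comp, pvDiffB]
      exact pvCondA_inc _ _
    · have hstep : pvStepA values (true, false, false) 0 = (false, false, false) := by
        simp [pvStepA, ← ha, ← hb, hab, safe_limits]
      rw [hstep, pvFoldA_tail values false false _ htail]
      have : b - a = 0 := by omega
      simp [this]
    · have hstep : pvStepA values (true, false, false) 0 =
          (safe_limits.contains |a - b|, false, true) := by
        simp [pvStepA, ← ha, ← hb, hab]
      rw [hstep, pvFoldA_tail values false true _ htail]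
      have hc : safe_limits.contains |a - b| =
          (decide (b - a = -1) || decide (b - a = -2) || decide (b - a = -3)) := by
        rw [Bool.eq_iff_iff]
        simp [safe_limits, abs_of_pos (by omega : 0 < a - b)]
        omega
      have hpos : (decide (b - a = 1) || decide (b - a = 2) || decide (b - a = 3)) = false := by
        simp; omega
      simp only [List.all_map, hc, hpos, Bool.false_and, Bool.false_or]
      congr 1
      refine List.all_congr rfl (fun i => ?_)
      simp only [Function.comp, pvDiffB]
      exact pvCondA_dec _ _
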